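-- pv_equiv track=rewrite | github.com/sebadel/adventofcode2021 | day10/day10.py | part2
-- ===== SOURCE A (Python) =====
-- def _first_illegal_character(line):
--     """Returns either an illegal character or an incomplete stack."""
--     MATCHES = ( ['{', '}'], ['(', ')'], ['<', '>'], ['[', ']'])
--     stack = []
--     for c in line:
--         if stack and [stack[-1], c] in MATCHES: # Remove matching element.
--             stack = stack[0:-1]
--         elif c in [m[1] for m in MATCHES]: # Next character is illegal
--              return c, None
--         else: # Next character is an open char.
--             stack.append(c)
--     return None, stack # Returns incomplete stack
--
-- def part2(data):
--     SCORES = ['(', '[', '{', '<']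
--     totals = []
--     for line in data:
--         _, incomplete = _first_illegal_character(line)
--         if incomplete:
--             score = 0
--             while incomplete:
--                 c = incomplete.pop()
--                 score = (score * 5) + SCORES.index(c) + 1
--             totals.append(score)
--     totals = sorted(totals)
--     return totals[int(len(totals)/2)]
-- ===== SOURCE B (Python) =====
-- def part2(data):
--     OPENERS = ['(', '[', '{', '<']
--     totals = []
--     for line in data:
--         s = line
--         while True:
--             t = s.replace('()', '').replace('[]', '').replace('{}', '').replace('<>', '')
--             if t == s:
--                 break
--             s = t
--         if any(ch in ')]}>' for ch in s) or not s:
--             continue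
--         score = 0
--         for ch in reversed(s):
--             score = score * 5 + OPENERS.index(ch) + 1
--         totals.append(score)
--     totals.sort()
--     return totals[len(totals) // 2]
-- ===== Notes on version B (the rewrite author's own statement) =====
-- stated objective: alternative
-- what changed: Replaces the explicit stack parser (_first_illegal_character) with repeated string reduction: each line is shrunk by deleting '()','[]','{}','<>' until a fixed point; a residual containing a closer marks a corrupted line, otherwise the residual is exactly the unmatched openers, scored right-to-left.
import Mathlib
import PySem

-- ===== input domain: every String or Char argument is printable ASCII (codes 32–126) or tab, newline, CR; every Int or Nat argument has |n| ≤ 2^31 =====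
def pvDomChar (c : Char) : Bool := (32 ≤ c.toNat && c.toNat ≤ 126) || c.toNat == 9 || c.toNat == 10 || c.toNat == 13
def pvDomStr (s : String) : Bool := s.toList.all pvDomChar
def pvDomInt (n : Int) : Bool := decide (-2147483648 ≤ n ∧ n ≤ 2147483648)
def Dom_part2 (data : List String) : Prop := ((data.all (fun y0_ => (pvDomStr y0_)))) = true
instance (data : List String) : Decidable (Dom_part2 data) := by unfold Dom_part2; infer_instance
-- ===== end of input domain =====

-- B: replaces the stack parser with repeated deletion of adjacent matched pairs; alternative algorithm, not claimed faster.

-- ===== PORT A =====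
-- MATCHES of _first_illegal_character (pairs stand for Python's two-element lists)
def ficMATCHES : List (Char × Char) := [('{', '}'), ('(', ')'), ('<', '>'), ('[', ']')]

-- the loop of _first_illegal_character: (illegal character, incomplete stack)
def ficGo : List Char → List Char → Option Char × Option (List Char)
  | [], stack => (none, some stack)
  | c :: rest, stack =>
    if stack ≠ [] ∧ (PySem.List.pyGetD stack (-1) ' ', c) ∈ ficMATCHES then
      ficGo rest (PySem.List.slice stack (some 0) (some (-1)))
    else if c ∈ ['}', ')', '>', ']'] then
      (some c, none)
    else
      ficGo rest (stack ++ [c])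

def pvSCORES : List Char := ['(', '[', '{', '<']

-- 'while incomplete: c = incomplete.pop(); score = (score * 5) + SCORES.index(c) + 1'
-- (SCORES.index raises ValueError for a char not in SCORES: Pre_ excludes that; the port defaults to 0 there)
def scoreLoopA (inc : List Char) (score : Int) : Int :=
  match h : PySem.List.pop? inc (-1) with
  | none => score
  | some r =>
    scoreLoopA r.2 (score * 5 + (((PySem.List.index? pvSCORES r.1).getD 0 : Nat) : Int) + 1)
termination_by inc.length
decreasing_by have := PySem.List.length_of_pop?_eq_some inc h; omega

-- totals[int(len(totals)/2)] raises IndexError on an empty list: Pre_ excludes that; the port defaults to 0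
def part2 (data : List String) : Int :=
  let totals := data.foldl (fun totals line =>
    match ficGo line.toList [] with
    | (_, some incomplete) =>
      if incomplete ≠ [] then totals ++ [scoreLoopA incomplete 0] else totals
    | (_, none) => totals) []
  let sorted := PySem.List.sorted totals (fun x => x) false
  (PySem.List.pyGet? sorted ((sorted.length / 2 : Nat) : Int)).getD 0

-- ===== PORT B =====
-- s.replace(ab, ''): one left-to-right non-overlapping pass
def rmAll (a b : Char) : List Char → List Char
  | x :: y :: t => if x = a ∧ y = b then rmAll a b t else x :: rmAll a b (y :: t)
  | l => l

-- the chained .replace('()','').replace('[]','').replace('{}','').replace('<>','')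
def stepB (s : List Char) : List Char :=
  rmAll '<' '>' (rmAll '{' '}' (rmAll '[' ']' (rmAll '(' ')' s)))

theorem rmAll_len_le (a b : Char) (l : List Char) : (rmAll a b l).length ≤ l.length := by
  fun_induction rmAll a b l <;> simp_all
  all_goals omega

theorem rmAll_eq_or_lt (a b : Char) (l : List Char) :
    rmAll a b l = l ∨ (rmAll a b l).length < l.length := by
  fun_induction rmAll a b l with
  | case1 x y t hxy ih =>
    right; have := rmAll_len_le a b t; simp; omega
  | case2 x y t hxy ih =>
    rcases ih with h | h
    · left; simp [h]
    · right; simp at h ⊢; omega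
  | case3 l _ => left; rfl

theorem stepB_lt {s : List Char} (hne : stepB s ≠ s) : (stepB s).length < s.length := by
  unfold stepB at *
  rcases rmAll_eq_or_lt '(' ')' s with h1 | h1 <;>
  rcases rmAll_eq_or_lt '[' ']' (rmAll '(' ')' s) with h2 | h2 <;>
  rcases rmAll_eq_or_lt '{' '}' (rmAll '[' ']' (rmAll '(' ')' s)) with h3 | h3 <;>
  rcases rmAll_eq_or_lt '<' '>' (rmAll '{' '}' (rmAll '[' ']' (rmAll '(' ')' s))) with h4 | h4 <;>
    simp_all <;> omega

-- 'while True: t = step(s); if t == s: break; s = t'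
def reduceB (s : List Char) : List Char :=
  let t := stepB s
  if h : t = s then s else reduceB t
termination_by s.length
decreasing_by exact stepB_lt h

def pvOPENERS : List Char := ['(', '[', '{', '<']

-- 'for ch in reversed(s): score = score * 5 + OPENERS.index(ch) + 1' (index defaults to 0 where Python raises)
def scoreLoopB : List Char → Int → Int
  | [], score => score
  | c :: rest, score =>
    scoreLoopB rest (score * 5 + (((PySem.List.index? pvOPENERS c).getD 0 : Nat) : Int) + 1)

def part2_alt (data : List String) : Int :=
  let totals := data.foldl (fun totals line =>
    let s := reduceB line.toList
    if (s.any fun ch => [')', ']', '}', '>'].contains ch) = true ∨ s = [] then totals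
    else totals ++ [scoreLoopB s.reverse 0]) []
  let sorted := PySem.List.sorted totals (fun x => x) false
  (PySem.List.pyGet? sorted ((sorted.length / 2 : Nat) : Int)).getD 0

-- ===== PRECONDITION & SPEC =====
-- independent standard bracket matcher used only to state Pre_: top of stack at the head
def pvMatchGo : List Char → List Char → Option (List Char)
  | [], st => some st
  | c :: rest, st =>
    if c = ')' ∨ c = ']' ∨ c = '}' ∨ c = '>' then
      match st with
      | t :: st' =>
        if (t, c) ∈ [('(', ')'), ('[', ']'), ('{', '}'), ('<', '>')] then pvMatchGo rest st'
        else none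
      | [] => none
    else pvMatchGo rest (c :: st)

-- line never scored with a non-opener on the stack (Python would raise ValueError)
def pvLineOK (l : List Char) : Bool :=
  match pvMatchGo l [] with
  | some st => st.all (fun c => ['(', '[', '{', '<'].contains c)
  | none => true

-- line is incomplete: A appends a score for it
def pvLineIncomplete (l : List Char) : Bool :=
  match pvMatchGo l [] with
  | some st => !st.isEmpty
  | none => false

-- Pre_ = exactly the inputs where Python A returns: no line whose unmatched residue contains a
-- non-opener is scored (ValueError in SCORES.index), and at least one line is incomplete
-- (otherwise totals is empty and totals[...] raises IndexError)
def Pre_part2 (data : List String) : Prop :=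
  (∀ l ∈ data, pvLineOK l.toList = true) ∧ (∃ l ∈ data, pvLineIncomplete l.toList = true)
instance (data : List String) : Decidable (Pre_part2 data) := by unfold Pre_part2; infer_instance

def pvWitness_part2 : List String := ["()(", "<{", "([)]"]

def Spec_part2 (data : List String) (out : Int) : Prop := out = part2_alt data
instance (data : List String) (out : Int) : Decidable (Spec_part2 data out) := by unfold Spec_part2; infer_instance

-- ===== CLAIM (what is proved, stated in full; the proofs are below) =====
def Claim_equal_part2 : Prop := ∀ (data : List String), Dom_part2 data → Pre_part2 data → Spec_part2 data (part2 data)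

-- ===== LEMMAS AND PROOFS =====

-- A-side basic facts -----------------------------------------------------------

theorem slice_zero_neg_one (xs : List Char) :
    PySem.List.slice xs (some 0) (some (-1)) = xs.dropLast := by
  simp [PySem.List.slice, List.dropLast_eq_take]

theorem mem_matches_snd {x y : Char} (h : (x, y) ∈ ficMATCHES) :
    y ∈ ['}', ')', '>', ']'] := by
  simp only [ficMATCHES, List.mem_cons, List.not_mem_nil, or_false] at h
  rcases h with h | h | h | h <;> rw [Prod.ext_iff] at h <;> rcases h with ⟨-, rfl⟩ <;> decide

theorem ficGo_append (u v st : List Char) :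
    ficGo (u ++ v) st =
      (match ficGo u st with
        | (c, none) => (c, none)
        | (_, some st') => ficGo v st') := by
  induction u generalizing st with
  | nil => simp [ficGo]
  | cons c rest ih =>
    simp only [List.cons_append, ficGo]
    split_ifs with h1 h2
    · exact ih _
    · rfl
    · exact ih _

theorem ficGo_cons (c : Char) (rest st : List Char) :
    ficGo (c :: rest) st =
      (if st ≠ [] ∧ (PySem.List.pyGetD st (-1) ' ', c) ∈ ficMATCHES then
        ficGo rest (PySem.List.slice st (some 0) (some (-1)))
      else if c ∈ ['}', ')', '>', ']'] then (some c, none)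
      else ficGo rest (st ++ [c])) := rfl

theorem ficGo_pair {a b : Char} (hab : (a, b) ∈ ficMATCHES)
    (ha : a ∉ ['}', ')', '>', ']']) (v st : List Char) :
    ficGo (a :: b :: v) st = ficGo v st := by
  have h1 : ¬ (st ≠ [] ∧ (PySem.List.pyGetD st (-1) ' ', a) ∈ ficMATCHES) := by
    rintro ⟨-, hm⟩; exact ha (mem_matches_snd hm)
  have h2 : (st ++ [a]) ≠ [] := by simp
  simp only [ficGo, if_neg h1, if_neg ha, if_pos
    (⟨h2, by rw [PySem.List.pyGetD_neg_one_append_singleton]; exact hab⟩ :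
      (st ++ [a]) ≠ [] ∧ (PySem.List.pyGetD (st ++ [a]) (-1) ' ', b) ∈ ficMATCHES)]
  rw [slice_zero_neg_one, List.dropLast_concat]

theorem rmAll_ficGo {a b : Char} (hab : (a, b) ∈ ficMATCHES)
    (ha : a ∉ ['}', ')', '>', ']']) (l : List Char) :
    ∀ st, ficGo (rmAll a b l) st = ficGo l st := by
  fun_induction rmAll a b l with
  | case1 x y t hxy ih =>
    intro st
    obtain ⟨rfl, rfl⟩ := hxy
    rw [ih st, ficGo_pair hab ha]
  | case2 x y t hxy ih =>
    intro st
    rw [ficGo_cons x (rmAll a b (y :: t)) st, ficGo_cons x (y :: t) st]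
    split_ifs <;> first | rfl | exact ih _
  | case3 l h => intro st; rfl

theorem stepB_ficGo (l : List Char) (st : List Char) :
    ficGo (stepB l) st = ficGo l st := by
  unfold stepB
  rw [rmAll_ficGo (by decide) (by decide),
      rmAll_ficGo (by decide) (by decide),
      rmAll_ficGo (by decide) (by decide),
      rmAll_ficGo (by decide) (by decide)]

theorem reduceB_ficGo (l : List Char) : ∀ st, ficGo (reduceB l) st = ficGo l st := by
  fun_induction reduceB l with
  | case1 l t h => intro st; rfl
  | case2 l t h ih => intro st; rw [ih st, stepB_ficGo]

theorem reduceB_fixed (l : List Char) : stepB (reduceB l) = reduceB l := by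
  fun_induction reduceB l with
  | case1 l t h => exact h
  | case2 l t h ih => exact ih

-- fixed point of stepB is a fixed point of each rmAll ------------------------------

theorem step_fix_rm {N : List Char} (h : stepB N = N) :
    rmAll '(' ')' N = N ∧ rmAll '[' ']' N = N ∧ rmAll '{' '}' N = N ∧ rmAll '<' '>' N = N := by
  unfold stepB at h
  have e1 : rmAll '(' ')' N = N := by
    rcases rmAll_eq_or_lt '(' ')' N with h1 | h1
    · exact h1
    · exfalso
      have l2 := rmAll_len_le '[' ']' (rmAll '(' ')' N)
      have l3 := rmAll_len_le '{' '}' (rmAll '[' ']' (rmAll '(' ')' N))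
      have l4 := rmAll_len_le '<' '>' (rmAll '{' '}' (rmAll '[' ']' (rmAll '(' ')' N)))
      have : (rmAll '<' '>' (rmAll '{' '}' (rmAll '[' ']' (rmAll '(' ')' N)))).length
          = N.length := by rw [h]
      omega
  rw [e1] at h
  have e2 : rmAll '[' ']' N = N := by
    rcases rmAll_eq_or_lt '[' ']' N with h1 | h1
    · exact h1
    · exfalso
      have l3 := rmAll_len_le '{' '}' (rmAll '[' ']' N)
      have l4 := rmAll_len_le '<' '>' (rmAll '{' '}' (rmAll '[' ']' N))
      have : (rmAll '<' '>' (rmAll '{' '}' (rmAll '[' ']' N))).length = N.length := by rw [h]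
      omega
  rw [e2] at h
  have e3 : rmAll '{' '}' N = N := by
    rcases rmAll_eq_or_lt '{' '}' N with h1 | h1
    · exact h1
    · exfalso
      have l4 := rmAll_len_le '<' '>' (rmAll '{' '}' N)
      have : (rmAll '<' '>' (rmAll '{' '}' N)).length = N.length := by rw [h]
      omega
  rw [e3] at h
  exact ⟨e1, e2, e3, h⟩

theorem rmAll_fix_no_split (a b : Char) (l : List Char) :
    rmAll a b l = l → ∀ u v, l ≠ u ++ a :: b :: v := by
  fun_induction rmAll a b l with
  | case1 x y t hxy ih =>
    intro h
    exfalso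
    have h1 := rmAll_len_le a b t
    have h2 : (rmAll a b t).length = (x :: y :: t).length := by rw [h]
    simp at h2; omega
  | case2 x y t hxy ih =>
    intro h u v he
    have h' : rmAll a b (y :: t) = y :: t := by injection h
    cases u with
    | nil =>
      simp at he
      exact hxy ⟨he.1, he.2.1⟩
    | cons z u' =>
      simp at he
      exact ih h' u' v he.2
  | case3 =>
    rename_i l2 hl
    intro _ u v he
    subst he
    cases u with
    | nil => exact hl a b v rfl
    | cons z u' =>
      have hne : u' ++ a :: b :: v ≠ [] := by simp
      obtain ⟨w, r, hw⟩ := List.exists_cons_of_ne_nil hne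
      exact hl z w r (by rw [List.cons_append, hw])

-- behaviour of ficGo on an irreducible residual ------------------------------------

theorem ficGo_all_open {N : List Char} (h : ∀ c ∈ N, c ∉ ['}', ')', '>', ']']) :
    ∀ st, ficGo N st = (none, some (st ++ N)) := by
  induction N with
  | nil => intro st; simp [ficGo]
  | cons c t ih =>
    intro st
    have hc : c ∉ ['}', ')', '>', ']'] := h c (by simp)
    have h1 : ¬ (st ≠ [] ∧ (PySem.List.pyGetD st (-1) ' ', c) ∈ ficMATCHES) := by
      rintro ⟨-, hm⟩; exact hc (mem_matches_snd hm)
    simp only [ficGo, if_neg h1, if_neg hc]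
    rw [ih (fun x hx => h x (by simp [hx]))]
    simp

theorem exists_first_closer {N : List Char} (h : ∃ c ∈ N, c ∈ ['}', ')', '>', ']']) :
    ∃ p c q, N = p ++ c :: q ∧ (∀ x ∈ p, x ∉ ['}', ')', '>', ']']) ∧ c ∈ ['}', ')', '>', ']'] := by
  induction N with
  | nil => simp at h
  | cons x t ih =>
    by_cases hx : x ∈ ['}', ')', '>', ']']
    · exact ⟨[], x, t, rfl, by simp, hx⟩
    · obtain ⟨c, hc1, hc2⟩ := h
      rcases List.mem_cons.mp hc1 with rfl | hct
      · exact absurd hc2 hx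
      · obtain ⟨p, c', q, rfl, hp, hc'⟩ := ih ⟨c, hct, hc2⟩
        exact ⟨x :: p, c', q, rfl, by
          intro z hz
          rcases List.mem_cons.mp hz with rfl | hzp
          · exact hx
          · exact hp z hzp, hc'⟩

theorem ficGo_corrupted {N : List Char} (hfix : stepB N = N)
    (hcl : ∃ c ∈ N, c ∈ ['}', ')', '>', ']']) :
    ∃ c, ficGo N [] = (some c, none) := by
  obtain ⟨e1, e2, e3, e4⟩ := step_fix_rm hfix
  obtain ⟨p, c, q, hN, hpopen, hcclose⟩ := exists_first_closer hcl
  refine ⟨c, ?_⟩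
  rw [hN, ficGo_append, ficGo_all_open hpopen, List.nil_append]
  have hnomatch : (PySem.List.pyGetD p (-1) ' ', c) ∉ ficMATCHES := by
    intro hm
    rcases List.eq_nil_or_concat p with rfl | ⟨p', x, rfl⟩
    · -- top-of-stack default ' ' never matches
      simp [PySem.List.pyGetD, PySem.List.pyGet?, ficMATCHES, Prod.ext_iff] at hm
    · rw [List.concat_eq_append] at hN hm hpopen
      rw [PySem.List.pyGetD_neg_one_append_singleton] at hm
      have hsplit : N = p' ++ x :: c :: q := by
        rw [hN]; simp
      have hfx : rmAll x c N = N := by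
        have hx4 : (x, c) ∈ ficMATCHES := hm
        fin_cases hx4 <;> assumption
      exact rmAll_fix_no_split x c N hfx p' q hsplit
  show ficGo (c :: q) p = (some c, none)
  rw [ficGo_cons, if_neg (by rintro ⟨-, hm⟩; exact hnomatch hm), if_pos hcclose]

-- the two scoring loops --------------------------------------------------------

theorem scores_eq (l : List Char) : ∀ s, scoreLoopA l s = scoreLoopB l.reverse s := by
  induction l using List.reverseRecOn with
  | nil => intro s; rw [scoreLoopA]; rfl
  | append_singleton t x ih =>
    intro s
    rw [scoreLoopA, PySem.List.pop?_last t x, List.reverse_append, List.reverse_singleton,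
      List.singleton_append, scoreLoopB]
    exact ih _

-- per-line equality of the totals accumulator ------------------------------------

theorem line_step_eq (line : String) (totals : List Int) :
    (match ficGo line.toList [] with
      | (_, some incomplete) =>
        if incomplete ≠ [] then totals ++ [scoreLoopA incomplete 0] else totals
      | (_, none) => totals) =
    (let s := reduceB line.toList
     if s.any (fun ch => [')', ']', '}', '>'].contains ch) ∨ s = [] then totals
     else totals ++ [scoreLoopB s.reverse 0]) := by
  have hfic : ficGo line.toList [] = ficGo (reduceB line.toList) [] :=
    (reduceB_ficGo line.toList []).symm
  have hfix : stepB (reduceB line.toList) = reduceB line.toList := reduceB_fixed line.toList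
  generalize hNdef : reduceB line.toList = N at hfic hfix ⊢
  show _ = (if (N.any fun ch => [')', ']', '}', '>'].contains ch) = true ∨ N = [] then totals
    else totals ++ [scoreLoopB N.reverse 0])
  by_cases hany : (N.any fun ch => [')', ']', '}', '>'].contains ch) = true
  · -- some closer survives: the line is corrupted for A as well
    have hcl : ∃ c ∈ N, c ∈ ['}', ')', '>', ']'] := by
      rw [List.any_eq_true] at hany
      obtain ⟨c, hc1, hc2⟩ := hany
      refine ⟨c, hc1, ?_⟩
      simp only [List.contains_eq_mem, decide_eq_true_eq] at hc2
      fin_cases hc2 <;> decide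
    obtain ⟨c, hcor⟩ := ficGo_corrupted hfix hcl
    rw [hfic, hcor, if_pos (Or.inl hany)]
  · -- no closer: the residual is exactly A's incomplete stack
    have hop : ∀ c ∈ N, c ∉ ['}', ')', '>', ']'] := by
      intro c hcN hmem
      apply hany
      rw [List.any_eq_true]
      refine ⟨c, hcN, ?_⟩
      simp only [List.contains_eq_mem, decide_eq_true_eq]
      fin_cases hmem <;> decide
    have hval : ficGo N [] = (none, some ([] ++ N)) := ficGo_all_open hop []
    rw [hfic, hval]
    by_cases hN : N = []
    · subst hN; simp
    · show (if N ≠ [] then totals ++ [scoreLoopA N 0] else totals) = _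
      rw [if_pos hN, if_neg (by rintro (h | h); exacts [hany h, hN h]), scores_eq]

theorem part2_eq_alt (data : List String) : part2 data = part2_alt data := by
  unfold part2 part2_alt
  have : ∀ init : List Int,
      data.foldl (fun totals line =>
        match ficGo line.toList [] with
        | (_, some incomplete) =>
          if incomplete ≠ [] then totals ++ [scoreLoopA incomplete 0] else totals
        | (_, none) => totals) init =
      data.foldl (fun totals line =>
        let s := reduceB line.toList
        if s.any (fun ch => [')', ']', '}', '>'].contains ch) ∨ s = [] then totals
        else totals ++ [scoreLoopB s.reverse 0]) init := by
    induction data with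
    | nil => intro init; rfl
    | cons l t ih =>
      intro init
      simp only [List.foldl_cons]
      rw [line_step_eq l init]
      exact ih _
  rw [this]

-- ===== VERDICT (by name: the statement is the Claim_ definition above) =====
theorem part2_spec : Claim_equal_part2 := by
  intro data _ _
  exact part2_eq_alt data
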